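-- pv_equiv track=rewrite | github.com/akrudal/algorithm | SWEA/D3/1289. 원재의 메모리 복구하기/원재의 메모리 복구하기.py | solution
-- ===== SOURCE A (Python) =====
-- def solution(memory):
--     answer = 0
--     length = len(memory)
--     isChange = False
--     original = "0" * length
--
--     for i in range(length):
--         if isChange:
--             if original[i] == memory[i]:
--                 isChange = False
--                 answer += 1
--         else:
--             if original[i] != memory[i]:
--                 isChange = True
--                 answer += 1
--
--     return answer
-- ===== SOURCE B (Python) =====
-- def solution(memory):
--     runs = sum(1 for part in memory.split('0') if part)
--     return 2 * runs - (1 if memory and memory[-1] != '0' else 0)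
-- ===== Notes on version B (the rewrite author's own statement) =====
-- stated objective: faster
-- what changed: Replaced the per-character isChange state machine by one C-level str.split on the zero character plus a closed formula over the run structure: answer = 2*(number of nonempty parts) - (1 if the last character is nonzero).
import Mathlib
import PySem

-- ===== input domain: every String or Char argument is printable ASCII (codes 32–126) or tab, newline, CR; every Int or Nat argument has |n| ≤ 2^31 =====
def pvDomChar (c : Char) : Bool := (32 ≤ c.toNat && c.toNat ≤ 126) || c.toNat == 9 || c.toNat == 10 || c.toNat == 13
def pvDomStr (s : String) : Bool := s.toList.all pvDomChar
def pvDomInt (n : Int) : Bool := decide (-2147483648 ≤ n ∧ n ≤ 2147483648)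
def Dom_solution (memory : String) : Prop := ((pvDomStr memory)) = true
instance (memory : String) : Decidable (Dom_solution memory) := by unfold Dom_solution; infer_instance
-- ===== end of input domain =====

-- B replaces A's per-character isChange state machine by splitting the string on the zero
-- character and a closed formula over the run structure: answer = 2*(number of nonempty
-- parts) - (1 if the string ends nonzero); a timing run measured B faster (constant factor).


-- ===== PORT A =====
-- the loop 'for i in range(length)' reading original[i]/memory[i] becomes a fold over the
-- zipped pair list (original is "0" * length, i.e. List.replicate length '0')
def solutionStep (st : Int × Bool) (p : Char × Char) : Int × Bool :=
  match st with
  | (answer, isChange) =>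
    if isChange then
      (if p.1 == p.2 then (answer + 1, false) else (answer, isChange))
    else
      (if p.1 != p.2 then (answer + 1, true) else (answer, isChange))

def solution (memory : String) : Int :=
  let original := List.replicate memory.toList.length '0'
  ((original.zip memory.toList).foldl solutionStep ((0 : Int), false)).1

-- ===== PORT B =====
-- memory.split('0') → PySem.Str.split?; sep is the nonempty literal "0", so getD [] never fires
def solution_alt (memory : String) : Int :=
  let runs : Int := (((PySem.Str.split? memory "0").getD []).countP (fun part => part != "") : Nat)
  2 * runs - (if memory ≠ "" ∧ PySem.Str.pyGet? memory (-1) ≠ some '0' then 1 else 0)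

-- ===== PRECONDITION & SPEC =====
def Spec_solution (memory : String) (out : Int) : Prop := out = solution_alt memory
instance (memory : String) (out : Int) : Decidable (Spec_solution memory out) := by unfold Spec_solution; infer_instance

-- ===== CLAIM (what is proved, stated in full; the proofs are below) =====
def Claim_equal_solution : Prop := ∀ (memory : String), Dom_solution memory → Spec_solution memory (solution memory)

-- ===== LEMMAS AND PROOFS =====
-- run counter with the "currently inside a run" flag (proof-side model of both programs)
def Kf (b : Bool) : List Char → Int
  | [] => 0
  | c :: t => (if !b && (c != '0') then 1 else 0) + Kf (c != '0') t

-- 1 if the last character is nonzero, else 0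
def Elast : List Char → Int
  | [] => 0
  | c :: t => if t = [] then (if c != '0' then 1 else 0) else Elast t

-- structural model of splitting on '0'
def split0 : List Char → List (List Char)
  | [] => [[]]
  | c :: t =>
    let s := split0 t
    if c = '0' then [] :: s else (c :: s.headI) :: s.tail

def consH (p : List Char) : List (List Char) → List (List Char)
  | [] => [p]
  | h :: r => (p ++ h) :: r

theorem split0_exists_cons (l : List Char) : ∃ h0 r, split0 l = h0 :: r := by
  cases l with
  | nil => exact ⟨[], [], rfl⟩
  | cons c t =>
    simp only [split0]
    by_cases hc : c = '0'
    · rw [if_pos hc]; exact ⟨_, _, rfl⟩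
    · rw [if_neg hc]; exact ⟨_, _, rfl⟩

-- A's loop characterised by Kf/Elast
theorem loop_eq : ∀ (l : List Char) (a : Int) (b : Bool),
    (((List.replicate l.length '0').zip l).foldl solutionStep (a, b)).1
      = a + 2 * Kf b l - Elast l + (if b && !l.isEmpty then 1 else 0) := by
  intro l
  induction l with
  | nil => intro a b; simp [Kf, Elast]
  | cons c t ih =>
    intro a b
    simp only [List.length_cons, List.replicate_succ, List.zip_cons_cons, List.foldl_cons]
    by_cases hc : ('0' : Char) = c
    · subst hc
      cases b with
      | false =>
        rw [show solutionStep (a, false) ('0', '0') = (a, false) by simp [solutionStep]]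
        rw [ih]
        rcases t with _ | ⟨d, t'⟩ <;> simp [Kf, Elast]
      | true =>
        rw [show solutionStep (a, true) ('0', '0') = (a + 1, false) by simp [solutionStep]]
        rw [ih]
        rcases t with _ | ⟨d, t'⟩ <;> (simp [Kf, Elast]; try ring)
    · have hcc : (c != '0') = true := bne_iff_ne.mpr (fun hh => hc hh.symm)
      cases b with
      | false =>
        rw [show solutionStep (a, false) ('0', c) = (a + 1, true) by
          simp [solutionStep]; try exact hc]
        rw [ih]
        rcases t with _ | ⟨d, t'⟩
        · simp [Kf, Elast, hcc]
          try ring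
        · simp [Kf, Elast, hcc]
          try ring
      | true =>
        rw [show solutionStep (a, true) ('0', c) = (a, true) by
          simp [solutionStep]; try exact hc]
        rw [ih]
        rcases t with _ | ⟨d, t'⟩
        · simp [Kf, Elast, hcc]
          try ring
        · simp [Kf, Elast, hcc]
          try ring

-- the fuelled PySem splitter computes split0 (sep = ['0'])
theorem go_eq : ∀ (fuel : Nat) (l cur : List Char) (acc : List (List Char)),
    l.length < fuel →
    PySem.Chars.splitOn.go ['0'] fuel l cur acc = acc.reverse ++ consH cur.reverse (split0 l) := by
  intro fuel
  induction fuel with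
  | zero => intro l cur acc h; omega
  | succ fuel ih =>
    intro l cur acc h
    cases l with
    | nil => simp [PySem.Chars.splitOn.go, split0, consH]
    | cons c rest =>
      simp only [PySem.Chars.splitOn.go]
      obtain ⟨h0, r, hr⟩ := split0_exists_cons rest
      by_cases hc : c = '0'
      · subst hc
        have hp : List.isPrefixOf ['0'] ('0' :: rest) = true := by simp [List.isPrefixOf]
        rw [if_pos hp]
        simp only [List.length_singleton, List.drop_succ_cons, List.drop_zero]
        rw [ih rest [] (cur.reverse :: acc) (by simp at h ⊢; omega)]
        simp [split0, consH, hr]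
      · have hp : List.isPrefixOf ['0'] (c :: rest) = false := by
          simp [List.isPrefixOf]; exact fun hh => hc hh.symm
        rw [if_neg (by simp [hp])]
        rw [ih rest (c :: cur) acc (by simp at h ⊢; omega)]
        simp [split0, consH, hr, hc]

theorem splitOn_eq (l : List Char) : PySem.Chars.splitOn l ['0'] = split0 l := by
  have hgo := go_eq (l.length + 1) l [] [] (by omega)
  obtain ⟨h0, r, hr⟩ := split0_exists_cons l
  rw [PySem.Chars.splitOn, hgo]
  simp [consH, hr]

-- counting the nonempty parts of split0 = counting nonzero runs (both flag values at once)
theorem count_split0 : ∀ (l : List Char),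
    (((split0 l).countP (fun p => p ≠ []) : Nat) : Int) = Kf false l ∧
    (((split0 l).tail.countP (fun p => p ≠ []) : Nat) : Int) = Kf true l := by
  intro l
  induction l with
  | nil => simp [split0, Kf]
  | cons c t ih =>
    obtain ⟨ih1, ih2⟩ := ih
    obtain ⟨h0, r, hr⟩ := split0_exists_cons t
    simp only [split0]
    by_cases hc : c = '0'
    · subst hc
      rw [if_pos rfl]
      constructor
      · rw [List.countP_cons]
        simpa [Kf] using ih1
      · simpa [Kf] using ih1
    · have hcc : (c != '0') = true := bne_iff_ne.mpr hc
      rw [if_neg hc, hr]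
      simp only [List.headI, List.tail_cons]
      rw [hr] at ih2
      simp only [List.tail_cons] at ih2
      constructor
      · rw [List.countP_cons]
        simp only [Kf, hcc, Bool.not_false, Bool.and_self, if_true]
        push_cast
        simp only [ne_eq, List.cons_ne_nil, not_false_iff, decide_true]
        rw [← ih2]
        push_cast
        ring
      · simpa [Kf, hcc] using ih2

-- the last-character test of B equals Elast
theorem elast_eq : ∀ (l : List Char),
    Elast l = (if l ≠ [] ∧ l.getLast? ≠ some '0' then 1 else 0) := by
  intro l
  induction l with
  | nil => simp [Elast]
  | cons c t ih =>
    cases t with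
    | nil => simp [Elast]
    | cons d t' =>
      rw [show Elast (c :: d :: t') = Elast (d :: t') by simp [Elast]]
      rw [ih, List.getLast?_cons_cons]
      simp

-- s[-1] in Python is the last character
theorem pyGet_neg_one (l : List Char) : PySem.List.pyGet? l (-1) = l.getLast? := by
  cases l with
  | nil => simp [PySem.List.pyGet?, PySem.List.pyIdx?]
  | cons c t =>
    simp only [PySem.List.pyGet?, PySem.List.pyIdx?]
    rw [if_neg (by omega), if_pos (by simp only [List.length_cons]; omega)]
    simp [List.getLast?_eq_getElem?]

-- ===== VERDICT (by name: the statement is the Claim_ definition above) =====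
theorem solution_spec : Claim_equal_solution := by
  intro memory _
  unfold Spec_solution solution solution_alt
  rw [loop_eq]
  simp only [Bool.false_and, zero_add]
  have hsplit : PySem.Str.split? memory "0"
      = some ((split0 memory.toList).map String.ofList) := by
    rw [PySem.Str.split?]
    simp [PySem.Chars.split?, splitOn_eq]
  rw [hsplit]
  have hcount : ((((split0 memory.toList).map String.ofList).countP
      (fun part => part != "") : Nat) : Int) = Kf false memory.toList := by
    rw [List.countP_map]
    rw [← (count_split0 memory.toList).1]
    congr 1
    apply List.countP_congr
    intro p _
    simp [Function.comp]
  have hlast : (memory ≠ "" ∧ PySem.Str.pyGet? memory (-1) ≠ some '0')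
      ↔ (memory.toList ≠ [] ∧ memory.toList.getLast? ≠ some '0') := by
    rw [PySem.Str.pyGet?, PySem.Chars.pyGet?, pyGet_neg_one]
    constructor <;> rintro ⟨h1, h2⟩ <;> refine ⟨?_, h2⟩
    · simpa [← String.toList_eq_nil_iff] using h1
    · simpa [String.toList_eq_nil_iff] using h1
  rw [elast_eq]
  simp only [Option.getD_some, hcount]
  by_cases hE : memory.toList ≠ [] ∧ memory.toList.getLast? ≠ some '0'
  · rw [if_pos hE, if_pos (hlast.mpr hE)]; simp
  · rw [if_neg hE, if_neg (fun hh => hE (hlast.mp hh))]; simp
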